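-- pv_equiv track=rewrite | github.com/Nick-Backend/python-dict | task22.py | group_students
-- ===== SOURCE A (Python) =====
-- def group_students(students: list[dict[str, str]]) -> dict[str, list[str]]:
--
--
--     result = {}
--
--     for student in students:
--           group = student["group"]
--           name = student["name"]
--
--           if group in result:
--               result[group].append(name)
--           else:
--               result[group] = [name]
--
--     return result
-- ===== SOURCE B (Python) =====
-- def group_students(students: list[dict[str, str]]) -> dict[str, list[str]]:
--     pairs = [(s["group"], s["name"]) for s in students]
--     groups = list(dict.fromkeys(g for g, _ in pairs))
--     return {g: [n for g2, n in pairs if g2 == g] for g in groups}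
-- ===== Notes on version B (the rewrite author's own statement) =====
-- stated objective: alternative
-- what changed: Replaces A's single-pass dict mutation (membership test + append-or-create per student) with a three-stage pipeline: extract (group, name) pairs, dedup the group keys in first-occurrence order via dict.fromkeys, then build each group's name list by a per-group filter pass.
import Mathlib
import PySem

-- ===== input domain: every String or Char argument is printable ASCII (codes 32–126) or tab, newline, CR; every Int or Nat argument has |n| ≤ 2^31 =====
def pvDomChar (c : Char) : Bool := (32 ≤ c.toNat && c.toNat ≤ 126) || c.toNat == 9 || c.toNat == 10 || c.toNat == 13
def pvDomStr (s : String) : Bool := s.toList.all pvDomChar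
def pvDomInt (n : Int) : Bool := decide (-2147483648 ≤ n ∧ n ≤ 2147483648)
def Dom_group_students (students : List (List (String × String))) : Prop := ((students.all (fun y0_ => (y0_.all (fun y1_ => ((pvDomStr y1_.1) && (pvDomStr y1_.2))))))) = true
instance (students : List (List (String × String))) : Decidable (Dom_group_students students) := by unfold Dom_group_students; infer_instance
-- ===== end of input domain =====

-- B replaces A's single-pass dict mutation by a pairs/dedup-keys/per-group-filter pipeline (alternative decomposition, same results).


-- ===== PORT A =====
-- student["group"] / student["name"]: Pre_ guarantees the key is present, so the .getD "" default is never taken inside Pre_.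
def group_students (students : List (List (String × String))) : List (String × List String) :=
  (students.foldl (fun result student =>
      let group := ((PySem.Dict.mk student).get? "group").getD ""
      let name := ((PySem.Dict.mk student).get? "name").getD ""
      if result.contains group then
        result.modify group [] (fun l => l ++ [name])   -- result[group].append(name)
      else
        result.insert group [name])
    PySem.Dict.empty).items

-- ===== PORT B =====
def group_students_alt (students : List (List (String × String))) : List (String × List String) :=
  let pairs := students.map (fun s =>
    (((PySem.Dict.mk s).get? "group").getD "", ((PySem.Dict.mk s).get? "name").getD ""))
  let groups := PySem.List.dedup (pairs.map Prod.fst)   -- list(dict.fromkeys(...))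
  groups.map (fun g => (g, (pairs.filter (fun p => p.1 == g)).map Prod.snd))

-- ===== PRECONDITION & SPEC =====
-- Pre_ excludes exactly the inputs where some student dict lacks the "group" or "name" key (Python A raises KeyError there).
def Pre_group_students (students : List (List (String × String))) : Prop :=
  ∀ s ∈ students, (PySem.Dict.mk s).contains "group" = true ∧ (PySem.Dict.mk s).contains "name" = true
instance (students : List (List (String × String))) : Decidable (Pre_group_students students) := by unfold Pre_group_students; infer_instance
def pvWitness_group_students : (List (List (String × String))) := [[("group", "a"), ("name", "Bob")], [("name", "Eve"), ("group", "b")]]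

def Spec_group_students (students : List (List (String × String))) (out : List (String × List String)) : Prop := out = group_students_alt students
instance (students : List (List (String × String))) (out : List (String × List String)) : Decidable (Spec_group_students students out) := by unfold Spec_group_students; infer_instance

-- ===== CLAIM (what is proved, stated in full; the proofs are below) =====
def Claim_equal_group_students : Prop := ∀ (students : List (List (String × String))), Dom_group_students students → Pre_group_students students → Spec_group_students students (group_students students)

-- ===== LEMMAS AND PROOFS =====

-- the (group, name) pair A reads from one student and B's pairs comprehension reads
def pvPair (s : List (String × String)) : String × String :=
  (((PySem.Dict.mk s).get? "group").getD "", ((PySem.Dict.mk s).get? "name").getD "")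

-- A's step (membership test, then append-or-create) IS dict-modify with default [].
theorem pv_step_eq (result : PySem.Dict String (List String)) (g n : String) :
    (if result.contains g then result.modify g [] (fun l => l ++ [n]) else result.insert g [n])
      = result.modify g [] (fun l => l ++ [n]) := by
  by_cases h : result.contains g = true
  · simp [h]
  · have hf : result.contains g = false := by simpa using h
    simp [h, PySem.Dict.modify, PySem.Dict.getD_of_not_contains result [] hf]

theorem pv_main (students : List (List (String × String))) :
    group_students students = group_students_alt students := by
  unfold group_students group_students_alt
  have h1 : students.foldl (fun result student =>
      let group := ((PySem.Dict.mk student).get? "group").getD ""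
      let name := ((PySem.Dict.mk student).get? "name").getD ""
      if result.contains group then
        result.modify group [] (fun l => l ++ [name])
      else
        result.insert group [name]) PySem.Dict.empty
      = (students.map pvPair).foldl (fun d p => d.modify p.1 [] (fun l => l ++ [p.2])) PySem.Dict.empty := by
    rw [List.foldl_map]
    exact PySem.List.foldl_congr_mem' students _ _ PySem.Dict.empty
      (fun s _ d => pv_step_eq d (pvPair s).1 (pvPair s).2)
  rw [h1]
  set ps := students.map pvPair with hps
  set D := ps.foldl (fun d p => d.modify p.1 [] (fun l => l ++ [p.2])) PySem.Dict.empty with hD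
  have hnd : D.keys.Nodup := by
    rw [hD]
    exact PySem.Dict.nodup_keys_foldl_modify_key ps Prod.fst [] (fun d p l => l ++ [p.2]) PySem.Dict.empty PySem.Dict.nodup_keys_empty
  have hkeys : D.keys = PySem.List.dedup (ps.map Prod.fst) := by
    rw [hD, PySem.Dict.keys_foldl_modify_key ps Prod.fst [] (fun d p l => l ++ [p.2]) PySem.Dict.empty]
    simp [PySem.Dict.keys, PySem.Dict.empty, PySem.Set.update_nil_left]
  have hget : ∀ c, D.getD c [] = (ps.filter (fun p => p.1 == c)).map Prod.snd := by
    intro c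
    rw [hD, PySem.Dict.getD_foldl_modify_append ps PySem.Dict.empty c]
    simp [PySem.Dict.getD_empty]
  rw [PySem.Dict.items_eq_map_keys D hnd [], hkeys]
  exact List.map_congr_left (fun g _ => by rw [hget g, hps]; rfl)

-- ===== VERDICT (by name: the statement is the Claim_ definition above) =====
theorem group_students_spec : Claim_equal_group_students := by
  intro students _ _
  exact pv_main students
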